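-- pv_equiv track=rewrite | github.com/XQJ-Trading/Valuator | valuator/core/aggregator/service.py | _table_blocks
-- ===== SOURCE A (Python) =====
-- def _table_blocks(markdown: str) -> list[list[str]]:
--     blocks: list[list[str]] = []
--     current: list[str] = []
--     for raw_line in markdown.splitlines():
--         line = raw_line.strip()
--         if "|" not in line:
--             if current:
--                 blocks.append(current)
--                 current = []
--             continue
--         current.append(line)
--     if current:
--         blocks.append(current)
--     return blocks
-- ===== SOURCE B (Python) =====
-- def _table_blocks(markdown: str) -> list[list[str]]:
--     lines = [l.strip() for l in markdown.splitlines()]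
--     blocks: list[list[str]] = []
--     i = 0
--     while i < len(lines):
--         if "|" not in lines[i]:
--             i += 1
--             continue
--         j = i + 1
--         while j < len(lines) and "|" in lines[j]:
--             j += 1
--         blocks.append(lines[i:j])
--         i = j
--     return blocks
-- ===== Notes on version B (the rewrite author's own statement) =====
-- stated objective: alternative
-- what changed: Replaces A's accumulator-and-flush state machine (a mutable `current` buffer appended to and flushed into `blocks`) with a run scanner over the pre-stripped line list: at each pipe line it advances a second index over the whole consecutive pipe run and slices it out as one block.
import Mathlib
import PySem

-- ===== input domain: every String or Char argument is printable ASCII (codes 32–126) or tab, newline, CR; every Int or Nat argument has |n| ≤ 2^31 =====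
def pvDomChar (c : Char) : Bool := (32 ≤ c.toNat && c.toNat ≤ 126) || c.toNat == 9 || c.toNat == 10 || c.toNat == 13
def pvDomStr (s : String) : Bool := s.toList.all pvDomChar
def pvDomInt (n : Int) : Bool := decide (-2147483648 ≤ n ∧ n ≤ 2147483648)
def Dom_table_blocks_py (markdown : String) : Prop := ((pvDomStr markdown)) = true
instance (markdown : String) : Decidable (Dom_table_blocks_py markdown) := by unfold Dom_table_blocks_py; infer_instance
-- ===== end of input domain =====

-- B replaces A's accumulator-and-flush state machine with a run scanner over the
-- pre-stripped line list (alternative decomposition, same linear cost).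

-- ===== PORT A =====
-- one loop iteration of A: state = (blocks, current)
def aStep (st : List (List String) × List String) (raw_line : String) :
    List (List String) × List String :=
  let line := PySem.Str.strip raw_line
  if PySem.Str.isIn "|" line = false then
    if st.2 = [] then (st.1, st.2) else (st.1 ++ [st.2], [])
  else (st.1, st.2 ++ [line])

def table_blocks_py (markdown : String) : List (List String) :=
  let st := (PySem.Str.splitlines markdown).foldl aStep ([], [])
  if st.2 = [] then st.1 else st.1 ++ [st.2]

-- ===== PORT B =====
def bKey (l : String) : Bool := PySem.Str.isIn "|" l

-- B's outer while-loop over the suffix of `lines` starting at index i;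
-- the inner while-loop scanning j over the pipe run is takeWhile/dropWhile.
def bRun : List String → List (List String)
  | [] => []
  | x :: rest =>
    if bKey x = false then bRun rest
    else (x :: rest.takeWhile bKey) :: bRun (rest.dropWhile bKey)
termination_by ls => ls.length
decreasing_by
  · simp
  · have := List.length_dropWhile_le (p := bKey) (l := rest); simp; omega

def table_blocks_py_alt (markdown : String) : List (List String) :=
  bRun ((PySem.Str.splitlines markdown).map PySem.Str.strip)

-- ===== PRECONDITION & SPEC =====
def Spec_table_blocks_py (markdown : String) (out : List (List String)) : Prop := out = table_blocks_py_alt markdown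
instance (markdown : String) (out : List (List String)) : Decidable (Spec_table_blocks_py markdown out) := by unfold Spec_table_blocks_py; infer_instance

-- ===== CLAIM (what is proved, stated in full; the proofs are below) =====
def Claim_equal_table_blocks_py : Prop := ∀ (markdown : String), Dom_table_blocks_py markdown → Spec_table_blocks_py markdown (table_blocks_py markdown)

-- ===== LEMMAS AND PROOFS =====

-- proof helper: what A's loop produces after the pending buffer `c` is nonempty
def auxB : List String → List String → List (List String)
  | c, [] => [c]
  | c, x :: rest => if bKey x then auxB (c ++ [x]) rest else c :: bRun rest

lemma bRun_nil : bRun [] = [] := by rw [bRun]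

lemma auxB_eq (c ss : List String) :
    auxB c ss = (c ++ ss.takeWhile bKey) :: bRun (ss.dropWhile bKey) := by
  induction ss generalizing c with
  | nil => simp [auxB, bRun_nil]
  | cons x rest ih =>
    by_cases h : bKey x
    · simp [auxB, h, ih]
    · simp [auxB, h, bRun]

lemma main_loop (ls : List String) (blocks : List (List String)) (current : List String) :
    (let st := ls.foldl aStep (blocks, current);
     if st.2 = [] then st.1 else st.1 ++ [st.2])
    = blocks ++ (if current = [] then bRun (ls.map PySem.Str.strip)
                 else auxB current (ls.map PySem.Str.strip)) := by
  induction ls generalizing blocks current with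
  | nil =>
    by_cases hc : current = [] <;> simp [hc, bRun_nil, auxB]
  | cons raw rest ih =>
    have hkey : PySem.Str.isIn "|" (PySem.Str.strip raw) = bKey (PySem.Str.strip raw) := rfl
    by_cases h : bKey (PySem.Str.strip raw)
    · by_cases hc : current = []
      · simp only [List.foldl_cons, aStep, hkey, h, hc]
        rw [ih]
        simp [bRun, h, auxB_eq]
      · simp only [List.foldl_cons, aStep, hkey, h, hc]
        rw [ih]
        simp only [List.map_cons, auxB, h, if_pos]
        simp [hc]
    · by_cases hc : current = []
      · simp only [List.foldl_cons, aStep, hkey, h, hc]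
        rw [ih]
        simp [bRun, h]
      · simp only [List.foldl_cons, aStep, hkey, h, hc]
        rw [ih]
        simp [auxB, h, List.append_assoc]

-- ===== VERDICT (by name: the statement is the Claim_ definition above) =====
theorem table_blocks_py_spec : Claim_equal_table_blocks_py := by
  intro markdown _
  unfold Spec_table_blocks_py table_blocks_py table_blocks_py_alt
  have := main_loop (PySem.Str.splitlines markdown) [] []
  simpa using this
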